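-- pv_equiv track=rewrite | github.com/suwon159/fire-dashboard | app.py | parse_fcst_weather
-- ===== SOURCE A (Python) =====
-- def parse_fcst_weather(items):
--     grouped = {}
--
--     for item in items:
--         fcst_date = item.get("fcstDate")
--         fcst_time = item.get("fcstTime")
--         category = item.get("category")
--         fcst_value = item.get("fcstValue")
--
--         if not fcst_date or not fcst_time or not category:
--             continue
--
--         key = f"{fcst_date}{fcst_time}"
--         if key not in grouped:
--             grouped[key] = {}
--
--         grouped[key][category] = fcst_value
--
--     if not grouped:
--         return None, None, None
--
--     candidate_keys = sorted(grouped.keys())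
--     selected_key = candidate_keys[0]
--
--     data = grouped[selected_key]
--     sky = data.get("SKY")
--     pty = data.get("PTY")
--
--     return selected_key, sky, pty
-- ===== SOURCE B (Python) =====
-- def parse_fcst_weather(items):
--     # Pass 1: find the lexicographically smallest valid key.
--     best = None
--     for item in items:
--         fcst_date = item.get("fcstDate")
--         fcst_time = item.get("fcstTime")
--         category = item.get("category")
--         if not fcst_date or not fcst_time or not category:
--             continue
--         key = f"{fcst_date}{fcst_time}"
--         if best is None or key < best:
--             best = key
--     if best is None:
--         return None, None, None
--     # Pass 2: last SKY/PTY value among valid items with the winning key.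
--     sky = None
--     pty = None
--     for item in items:
--         fcst_date = item.get("fcstDate")
--         fcst_time = item.get("fcstTime")
--         category = item.get("category")
--         if not fcst_date or not fcst_time or not category:
--             continue
--         if f"{fcst_date}{fcst_time}" != best:
--             continue
--         if category == "SKY":
--             sky = item.get("fcstValue")
--         elif category == "PTY":
--             pty = item.get("fcstValue")
--     return best, sky, pty
-- ===== Notes on version B (the rewrite author's own statement) =====
-- stated objective: simpler
-- what changed: Replaces the dict-of-dicts grouping plus full sort of all keys by two plain passes: a running minimum over valid keys, then a scan that overwrites SKY/PTY for items matching the winning key.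
import Mathlib
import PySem

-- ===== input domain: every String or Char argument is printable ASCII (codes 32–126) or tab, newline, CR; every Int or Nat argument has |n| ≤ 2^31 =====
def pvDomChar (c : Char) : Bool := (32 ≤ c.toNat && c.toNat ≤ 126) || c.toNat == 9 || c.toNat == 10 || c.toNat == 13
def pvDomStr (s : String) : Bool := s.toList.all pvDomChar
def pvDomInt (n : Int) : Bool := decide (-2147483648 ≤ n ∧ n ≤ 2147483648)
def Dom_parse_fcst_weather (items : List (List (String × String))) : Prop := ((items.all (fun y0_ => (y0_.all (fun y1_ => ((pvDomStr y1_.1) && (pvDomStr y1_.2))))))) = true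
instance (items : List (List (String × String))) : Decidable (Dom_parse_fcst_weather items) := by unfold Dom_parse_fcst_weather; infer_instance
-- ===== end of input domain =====

-- B is simpler: two plain passes (running minimum over the valid keys, then overwriting SKY/PTY
-- for items with the winning key) instead of A's dict-of-dicts grouping plus a sort of all keys.

-- shared per-item accessors (the 'item.get(...)' lines and the guard, identical in both Pythons)
def pvGet (item : List (String × String)) (k : String) : Option String :=
  (item.find? (fun p => p.1 == k)).map (·.2)

-- Python truthiness of an Optional[str]: falsy iff missing or empty
def pvFalsy : Option String → Bool
  | none => true
  | some s => s == ""

-- 'if not fcst_date or not fcst_time or not category: continue'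
def pvSkip (item : List (String × String)) : Bool :=
  pvFalsy (pvGet item "fcstDate") || pvFalsy (pvGet item "fcstTime") || pvFalsy (pvGet item "category")

-- key = f"{fcst_date}{fcst_time}" (guard guarantees both are present and nonempty)
def pvKey (item : List (String × String)) : String :=
  (pvGet item "fcstDate").getD "" ++ (pvGet item "fcstTime").getD ""

def pvCat (item : List (String × String)) : String :=
  (pvGet item "category").getD ""

-- ===== PORT A =====
def parse_fcst_weather (items : List (List (String × String))) : Option String × Option String × Option String :=
  let grouped : PySem.Dict String (PySem.Dict String (Option String)) :=
    items.foldl (fun g item =>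
      if pvSkip item then g
      else
        -- "if key not in grouped: grouped[key] = {}" then "grouped[key][category] = fcst_value"
        g.insert (pvKey item)
          (((g.get? (pvKey item)).getD PySem.Dict.empty).insert (pvCat item) (pvGet item "fcstValue")))
      PySem.Dict.empty
  if grouped.size = 0 then (none, none, none)
  else
    match PySem.List.sorted grouped.keys (fun x => x) false with
    | [] => (none, none, none)   -- unreachable: grouped is nonempty here
    | selected :: _ =>
      let data := (grouped.get? selected).getD PySem.Dict.empty
      (some selected, (data.get? "SKY").join, (data.get? "PTY").join)

-- ===== PORT B =====
def parse_fcst_weather_alt (items : List (List (String × String))) : Option String × Option String × Option String :=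
  let best : Option String :=
    items.foldl (fun b item =>
      if pvSkip item then b
      else
        match b with
        | none => some (pvKey item)
        | some m => if pvKey item < m then some (pvKey item) else b) none
  match best with
  | none => (none, none, none)
  | some k =>
    let sp : Option String × Option String :=
      items.foldl (fun sp item =>
        if pvSkip item then sp
        else if pvKey item ≠ k then sp
        else if pvCat item = "SKY" then (pvGet item "fcstValue", sp.2)
        else if pvCat item = "PTY" then (sp.1, pvGet item "fcstValue")
        else sp) (none, none)
    (some k, sp.1, sp.2)

-- ===== PRECONDITION & SPEC =====
def Spec_parse_fcst_weather (items : List (List (String × String))) (out : Option String × Option String × Option String) : Prop := out = parse_fcst_weather_alt items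
instance (items : List (List (String × String))) (out : Option String × Option String × Option String) : Decidable (Spec_parse_fcst_weather items out) := by unfold Spec_parse_fcst_weather; infer_instance

-- ===== CLAIM (what is proved, stated in full; the proofs are below) =====
def Claim_equal_parse_fcst_weather : Prop := ∀ (items : List (List (String × String))), Dom_parse_fcst_weather items → Spec_parse_fcst_weather items (parse_fcst_weather items)

-- ===== LEMMAS AND PROOFS =====

-- a guarded loop is a fold over the filtered list
theorem pv_foldl_skip {α β : Type} (cond : α → Bool) (f : β → α → β) (l : List α) (init : β) :
    l.foldl (fun acc x => if cond x then acc else f acc x) init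
      = (l.filter (fun x => !cond x)).foldl f init := by
  induction l generalizing init with
  | nil => rfl
  | cons x t ih => by_cases h : cond x <;> simp [h, ih]

-- A's grouping step, over the already-filtered list
def pvStepA (g : PySem.Dict String (PySem.Dict String (Option String)))
    (item : List (String × String)) : PySem.Dict String (PySem.Dict String (Option String)) :=
  g.insert (pvKey item)
    (((g.get? (pvKey item)).getD PySem.Dict.empty).insert (pvCat item) (pvGet item "fcstValue"))

-- B's first-pass (running-minimum) step, and its second-pass step for a fixed winning key
def pvStepMin (b : Option String) (item : List (String × String)) : Option String :=
  match b with
  | none => some (pvKey item)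
  | some m => if pvKey item < m then some (pvKey item) else b

def pvStepB (k : String) (sp : Option String × Option String)
    (item : List (String × String)) : Option String × Option String :=
  if pvKey item ≠ k then sp
  else if pvCat item = "SKY" then (pvGet item "fcstValue", sp.2)
  else if pvCat item = "PTY" then (sp.1, pvGet item "fcstValue")
  else sp

theorem pv_groupedA_eq (items : List (List (String × String))) :
    items.foldl (fun g item =>
      if pvSkip item then g
      else
        g.insert (pvKey item)
          (((g.get? (pvKey item)).getD PySem.Dict.empty).insert (pvCat item) (pvGet item "fcstValue")))
      PySem.Dict.empty
      = (items.filter (fun x => !pvSkip x)).foldl pvStepA PySem.Dict.empty :=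
  pv_foldl_skip pvSkip pvStepA items PySem.Dict.empty

theorem pv_bestB_eq (items : List (List (String × String))) :
    items.foldl (fun b item =>
      if pvSkip item then b
      else
        match b with
        | none => some (pvKey item)
        | some m => if pvKey item < m then some (pvKey item) else b) none
      = (items.filter (fun x => !pvSkip x)).foldl pvStepMin none :=
  pv_foldl_skip pvSkip pvStepMin items none

theorem pv_spB_eq (k : String) (items : List (List (String × String))) :
    items.foldl (fun sp item =>
      if pvSkip item then sp
      else if pvKey item ≠ k then sp
      else if pvCat item = "SKY" then (pvGet item "fcstValue", sp.2)
      else if pvCat item = "PTY" then (sp.1, pvGet item "fcstValue")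
      else sp) (none, none)
      = (items.filter (fun x => !pvSkip x)).foldl (pvStepB k) (none, none) :=
  pv_foldl_skip pvSkip (pvStepB k) items (none, none)

-- keys of the grouped dict = set of keys of the valid items
theorem pv_keys_grouped (V : List (List (String × String))) :
    (V.foldl pvStepA PySem.Dict.empty).keys = PySem.Set.ofList (V.map pvKey) := by
  have h := PySem.Dict.keys_foldl_insert_key V pvKey
    (fun g item => ((g.get? (pvKey item)).getD PySem.Dict.empty).insert (pvCat item) (pvGet item "fcstValue"))
    PySem.Dict.empty
  simpa [pvStepA, PySem.Dict.keys_empty, PySem.Set.update_nil_left] using h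

-- B's running minimum over an option accumulator = the plain running minimum
theorem pv_minfold_some (l : List (List (String × String))) (m : String) :
    l.foldl pvStepMin (some m) = some ((l.map pvKey).foldl min m) := by
  induction l generalizing m with
  | nil => rfl
  | cons x t ih =>
      have hstep : pvStepMin (some m) x = some (min m (pvKey x)) := by
        unfold pvStepMin
        by_cases h : pvKey x < m
        · simp [h, min_eq_right (le_of_lt h)]
        · simp [h, min_eq_left (le_of_not_gt h)]
      rw [List.foldl_cons, hstep, ih, List.map_cons, List.foldl_cons]

-- the SKY/PTY lookups in A's group dict for key k = B's second pass
theorem pv_lookup_eq (k : String) (V : List (List (String × String))) :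
    ((((V.foldl pvStepA PySem.Dict.empty).get? k).getD PySem.Dict.empty |>.get? "SKY").join,
     (((V.foldl pvStepA PySem.Dict.empty).get? k).getD PySem.Dict.empty |>.get? "PTY").join)
      = V.foldl (pvStepB k) (none, none) := by
  induction V using List.reverseRecOn with
  | nil => simp [PySem.Dict.get?_empty]
  | append_singleton t x ih =>
      simp only [List.foldl_append, List.foldl_cons, List.foldl_nil]
      by_cases hk : pvKey x = k
      · subst hk
        simp only [pvStepA, PySem.Dict.get?_insert_self, Option.getD_some]
        by_cases hs : pvCat x = "SKY"
        · rw [hs, PySem.Dict.get?_insert_self,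
            PySem.Dict.get?_insert_of_ne _ _ (show ("PTY" : String) ≠ "SKY" by decide)]
          simp [pvStepB, hs, ← ih]
        · by_cases hp : pvCat x = "PTY"
          · rw [hp, PySem.Dict.get?_insert_self,
              PySem.Dict.get?_insert_of_ne _ _ (show ("SKY" : String) ≠ "PTY" by decide)]
            simp [pvStepB, hp, ← ih]
          · rw [PySem.Dict.get?_insert_of_ne _ _ (fun h => hs h.symm),
              PySem.Dict.get?_insert_of_ne _ _ (fun h => hp h.symm)]
            simp [pvStepB, hs, hp, ih]
      · simp only [pvStepA]
        rw [PySem.Dict.get?_insert_of_ne _ _ (fun h => hk h.symm)]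
        simp [pvStepB, hk, ih]

-- ===== VERDICT (by name: the statement is the Claim_ definition above) =====
theorem parse_fcst_weather_spec : Claim_equal_parse_fcst_weather := by
  intro items _
  show parse_fcst_weather items = parse_fcst_weather_alt items
  simp only [parse_fcst_weather, parse_fcst_weather_alt]
  rw [pv_groupedA_eq, pv_bestB_eq]
  set V := items.filter (fun x => !pvSkip x) with hV
  cases hks : V.map pvKey with
  | nil =>
      have hVnil : V = [] := by
        cases hVc : V with
        | nil => rfl
        | cons a t => rw [hVc] at hks; simp at hks
      rw [hVnil]
      simp [PySem.Dict.size_empty]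
  | cons k0 t =>
      -- B's best key: the running minimum m of the valid keys
      have hVc : ∃ a s, V = a :: s := by
        cases hVc2 : V with
        | nil => rw [hVc2] at hks; simp at hks
        | cons a s => exact ⟨a, s, rfl⟩
      obtain ⟨a, s, hVc⟩ := hVc
      have hbest : V.foldl pvStepMin none = some ((s.map pvKey).foldl min (pvKey a)) := by
        rw [hVc, List.foldl_cons]
        have : pvStepMin none a = some (pvKey a) := rfl
        rw [this, pv_minfold_some]
      set m := (s.map pvKey).foldl min (pvKey a) with hm
      have hmin? : PySem.List.min? (V.map pvKey) (fun y => y) = some m := by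
        rw [hVc, List.map_cons]
        exact PySem.List.min?_id_cons (pvKey a) (s.map pvKey)
      have hmmem : m ∈ V.map pvKey := PySem.List.min?_mem hmin?
      have hmle : ∀ y ∈ V.map pvKey, m ≤ y := fun y hy => PySem.List.min?_isMin hmin? y hy
      -- A's grouped dict is nonempty, and the head of its sorted key list is m
      have hkeys : (V.foldl pvStepA PySem.Dict.empty).keys = PySem.Set.ofList (V.map pvKey) :=
        pv_keys_grouped V
      have hkeysne : (V.foldl pvStepA PySem.Dict.empty).keys ≠ [] := by
        rw [hkeys]
        intro h
        have : m ∈ PySem.Set.ofList (V.map pvKey) := (PySem.Set.mem_ofList _ _).mpr hmmem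
        rw [h] at this
        exact (List.not_mem_nil) this
      have hsize : ¬ (V.foldl pvStepA PySem.Dict.empty).size = 0 := by
        intro h
        apply hkeysne
        have hlen : (V.foldl pvStepA PySem.Dict.empty).keys.length = 0 := by
          simpa [PySem.Dict.keys, PySem.Dict.size] using h
        exact List.eq_nil_of_length_eq_zero hlen
      cases hS : PySem.List.sorted (V.foldl pvStepA PySem.Dict.empty).keys (fun x => x) false with
      | nil => exact absurd ((PySem.List.sorted_eq_nil_iff _ _ _).mp hS) hkeysne
      | cons sel rest =>
          have hselmem : sel ∈ (V.foldl pvStepA PySem.Dict.empty).keys := by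
            have : sel ∈ PySem.List.sorted (V.foldl pvStepA PySem.Dict.empty).keys (fun x => x) false := by
              rw [hS]; exact List.mem_cons_self
            exact (PySem.List.mem_sorted _ _ _ _).mp this
          have hselm : sel = m := by
            apply le_antisymm
            · exact PySem.List.key_head_sorted_le _ _ hS m
                (by rw [hkeys]; exact (PySem.Set.mem_ofList _ _).mpr hmmem)
            · exact hmle sel (by rw [hkeys, PySem.Set.mem_ofList] at hselmem; exact hselmem)
          rw [hbest]
          simp only [if_neg hsize, hselm, pv_spB_eq, ← hV]
          have hlook := pv_lookup_eq m V
          have h1 := congrArg Prod.fst hlook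
          have h2 := congrArg Prod.snd hlook
          simp only at h1 h2
          rw [h1, h2]
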